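-- pv_equiv track=rewrite | github.com/masaki-sakata/EntityTree | scripts/eval_tree.py | _collect_splits
-- ===== SOURCE A (Python) =====
-- def _collect_splits(adj, n_leaves):
--     splits = set()
--     def leaves_under(node, visited):
--         if node in visited: return set()
--         visited.add(node)
--         if node < n_leaves: return {node}
--         leaves = set()
--         for ch in adj.get(node, []):
--             leaves |= leaves_under(ch, visited.copy())
--         return leaves
--
--     for parent, children in adj.items():
--         for ch in children:                       # ← 子ごとに edge-split
--             subset = leaves_under(ch, set())
--             if 0 < len(subset) < n_leaves:
--                 # 小さい側を代表にして正規化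
--                 rep = frozenset(subset if len(subset) <= n_leaves/2
--                                 else set(range(n_leaves)) - subset)
--                 splits.add(rep)
--     return list(splits)
-- ===== SOURCE B (Python) =====
-- def _collect_splits(adj, n_leaves):
--     # B: one iterative stack-DFS with a shared visited set per start node
--     # (no per-path visited copies, no recursion), then the same normalization.
--     def reach_leaves(start):
--         seen, leaves, stack = set(), set(), [start]
--         while stack:
--             node = stack.pop()
--             if node in seen:
--                 continue
--             seen.add(node)
--             if node < n_leaves:
--                 leaves.add(node)
--             else:
--                 stack.extend(adj.get(node, ()))
--         return leaves
--
--     splits = set()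
--     for children in adj.values():
--         for ch in children:
--             subset = reach_leaves(ch)
--             if 0 < len(subset) < n_leaves:
--                 rep = frozenset(subset if len(subset) <= n_leaves / 2
--                                 else set(range(n_leaves)) - subset)
--                 splits.add(rep)
--     return list(splits)
-- ===== Notes on version B (the rewrite author's own statement) =====
-- stated objective: faster
-- what changed: Replaces the per-edge recursive DFS that copies the visited set at every child (re-exploring shared substructure, exponential on DAGs with shared children) by one iterative stack DFS per start node with a single shared seen set.
import Mathlib
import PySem

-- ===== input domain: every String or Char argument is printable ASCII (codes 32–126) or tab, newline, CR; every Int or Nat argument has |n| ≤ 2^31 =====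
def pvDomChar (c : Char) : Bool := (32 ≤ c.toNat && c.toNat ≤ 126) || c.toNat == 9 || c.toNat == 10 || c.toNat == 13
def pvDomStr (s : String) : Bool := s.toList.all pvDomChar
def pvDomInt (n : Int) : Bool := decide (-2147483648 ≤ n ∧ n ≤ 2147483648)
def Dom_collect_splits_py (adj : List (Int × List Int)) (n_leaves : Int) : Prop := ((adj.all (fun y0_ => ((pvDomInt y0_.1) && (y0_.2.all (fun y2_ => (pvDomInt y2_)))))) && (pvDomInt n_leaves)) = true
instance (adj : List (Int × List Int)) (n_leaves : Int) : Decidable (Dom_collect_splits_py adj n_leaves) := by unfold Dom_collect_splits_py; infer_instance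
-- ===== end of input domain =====

-- B replaces A's per-edge recursive DFS (which copies the visited set for every
-- child and re-explores shared substructure) by one iterative stack DFS per
-- start node with a single shared seen set; same normalized splits.
-- Sets of ints are PySem.Set values; each frozenset is represented canonically
-- (sorted / ascending), and the returned list of sets is in first-insertion
-- order (the Python returns list(set(...)), whose hash order is not modelled;
-- the result is compared as a set of sets).

-- ===== PORT A =====
-- adj.get(node, [])
def adjGet (adj : List (Int × List Int)) (node : Int) : List Int :=
  (PySem.Dict.mk adj).getD node []

-- distinct keys of adj (used only for fuel bounds of the two loops)
def keysD (adj : List (Int × List Int)) : List Int :=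
  PySem.List.dedup (adj.map (fun p => p.1))

-- leaves_under: recursion guarded by fuel; every level of recursion adds an
-- unvisited key of adj to visited, so fuel (keysD adj).length + 1 is never
-- exhausted (proved below via keysLeft).
def leavesUnderA (adj : List (Int × List Int)) (nl : Int) :
    Nat → Int → PySem.Set Int → PySem.Set Int
  | 0, _, _ => PySem.Set.empty
  | fuel+1, node, visited =>
    if node ∈ visited then PySem.Set.empty
    else
      let visited' := PySem.Set.add visited node
      if node < nl then PySem.Set.add PySem.Set.empty node
      else (adjGet adj node).foldl
            (fun leaves ch => PySem.Set.union leaves (leavesUnderA adj nl fuel ch visited'))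
            PySem.Set.empty

-- rep = frozenset(subset) if len(subset) <= n_leaves/2 else frozenset(set(range(n_leaves)) - subset);
-- 'len(subset) <= n_leaves/2' (true division) is exact as 2*len <= n_leaves;
-- a frozenset of ints is represented by its ascending element list.
def canonSplit (nl : Int) (subset : List Int) : List Int :=
  if 2 * (subset.length : Int) ≤ nl then PySem.List.sorted subset (fun x => x)
  else (PySem.List.pyRange 0 nl 1).filter (fun i => decide (i ∉ subset))

def collect_splits_py (adj : List (Int × List Int)) (n_leaves : Int) : List (List Int) :=
  adj.foldl (fun splits pc =>
    pc.2.foldl (fun splits ch =>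
      let subset := leavesUnderA adj n_leaves ((keysD adj).length + 1) ch PySem.Set.empty
      if 0 < subset.length ∧ (subset.length : Int) < n_leaves then
        PySem.Set.add splits (canonSplit n_leaves subset)
      else splits) splits) PySem.Set.empty

-- ===== PORT B =====
-- fuel for the while loop: 1 + sum over distinct keys of (1 + #children);
-- each iteration strictly decreases the matching measure (proved below).
def dfsFuelB (adj : List (Int × List Int)) : Nat :=
  1 + ((keysD adj).map (fun k => 1 + (adjGet adj k).length)).sum

-- while stack: node = stack.pop(); skip if seen; mark; collect leaf or push
-- children.  The stack top is the list head: Python's pop()/extend(children)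
-- pops the last pushed element, i.e. prepending children.reverse.
-- Returns the final loop state (seen, leaves).
def dfsB (adj : List (Int × List Int)) (nl : Int) :
    Nat → List Int → PySem.Set Int → PySem.Set Int → PySem.Set Int × PySem.Set Int
  | 0, _, seen, leaves => (seen, leaves)
  | fuel+1, stack, seen, leaves =>
    match stack with
    | [] => (seen, leaves)
    | node :: rest =>
      if node ∈ seen then dfsB adj nl fuel rest seen leaves
      else
        let seen' := PySem.Set.add seen node
        if node < nl then dfsB adj nl fuel rest seen' (PySem.Set.add leaves node)
        else dfsB adj nl fuel ((adjGet adj node).reverse ++ rest) seen' leaves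

def reachLeavesB (adj : List (Int × List Int)) (nl : Int) (start : Int) : PySem.Set Int :=
  (dfsB adj nl (dfsFuelB adj) [start] PySem.Set.empty PySem.Set.empty).2

def collect_splits_py_alt (adj : List (Int × List Int)) (n_leaves : Int) : List (List Int) :=
  adj.foldl (fun splits pc =>
    pc.2.foldl (fun splits ch =>
      let subset := reachLeavesB adj n_leaves ch
      if 0 < subset.length ∧ (subset.length : Int) < n_leaves then
        PySem.Set.add splits (canonSplit n_leaves subset)
      else splits) splits) PySem.Set.empty

-- ===== PRECONDITION & SPEC =====
def Spec_collect_splits_py (adj : List (Int × List Int)) (n_leaves : Int) (out : List (List Int)) : Prop := out = collect_splits_py_alt adj n_leaves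
instance (adj : List (Int × List Int)) (n_leaves : Int) (out : List (List Int)) : Decidable (Spec_collect_splits_py adj n_leaves out) := by unfold Spec_collect_splits_py; infer_instance

-- ===== CLAIM (what is proved, stated in full; the proofs are below) =====
def Claim_equal_collect_splits_py : Prop := ∀ (adj : List (Int × List Int)) (n_leaves : Int), Dom_collect_splits_py adj n_leaves → Spec_collect_splits_py adj n_leaves (collect_splits_py adj n_leaves)

-- ===== LEMMAS AND PROOFS =====

-- `x reaches y` through internal nodes (nodes ≥ nl), following adj children.
inductive Reaches (adj : List (Int × List Int)) (nl : Int) : Int → Int → Prop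
  | refl (x : Int) : Reaches adj nl x x
  | step {x c y : Int} : ¬ x < nl → c ∈ adjGet adj x → Reaches adj nl c y →
      Reaches adj nl x y

-- A's path-visited recursion, as a derivation: reach l from x while every node
-- on the path (l included) avoids V, ancestors being added to V on the way down.
inductive Avoids (adj : List (Int × List Int)) (nl : Int) : (Int → Prop) → Int → Int → Prop
  | leaf {V : Int → Prop} {l : Int} : ¬ V l → l < nl → Avoids adj nl V l l
  | step {V : Int → Prop} {x c l : Int} : ¬ V x → ¬ x < nl → c ∈ adjGet adj x →
      Avoids adj nl (fun z => V z ∨ z = x) c l → Avoids adj nl V x l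

-- explicit walks: p = x :: … :: l, consecutive via children, non-final nodes internal
inductive Walk (adj : List (Int × List Int)) (nl : Int) : List Int → Int → Prop
  | single {l : Int} : l < nl → Walk adj nl [l] l
  | cons {x y : Int} {p : List Int} {l : Int} : ¬ x < nl → y ∈ adjGet adj x →
      Walk adj nl (y :: p) l → Walk adj nl (x :: y :: p) l

theorem adjGet_eq_nil_of_not_mem (adj : List (Int × List Int)) (node : Int)
    (h : node ∉ adj.map (fun p => p.1)) : adjGet adj node = [] := by
  have h2 : (PySem.Dict.mk adj).get? node = none := by
    rw [PySem.Dict.get?_eq_none_iff_not_mem_keys]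
    simpa [PySem.Dict.keys] using h
  simp [adjGet, PySem.Dict.getD, h2]

theorem avoids_not {adj : List (Int × List Int)} {nl : Int} {V : Int → Prop} {x l : Int}
    (h : Avoids adj nl V x l) : ¬ V x := by
  cases h with
  | leaf h1 _ => exact h1
  | step h1 _ _ _ => exact h1

theorem avoids_congr {adj : List (Int × List Int)} {nl : Int} {V W : Int → Prop} {x l : Int}
    (hVW : ∀ z, V z ↔ W z) (h : Avoids adj nl V x l) : Avoids adj nl W x l := by
  induction h generalizing W with
  | leaf h1 h2 => exact .leaf (fun hw => h1 ((hVW _).2 hw)) h2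
  | step h1 h2 h3 _ ih =>
      exact .step (fun hw => h1 ((hVW _).2 hw)) h2 h3
        (ih (fun z => or_congr (hVW z) Iff.rfl))

theorem mem_foldl_union (f : Int → PySem.Set Int) (cs : List Int) (init : PySem.Set Int)
    (l : Int) :
    (l ∈ cs.foldl (fun a c => PySem.Set.union a (f c)) init) ↔
      l ∈ init ∨ ∃ c ∈ cs, l ∈ f c := by
  induction cs generalizing init with
  | nil => simp
  | cons c cs ih =>
      simp only [List.foldl_cons, ih, PySem.Set.mem_union]
      constructor
      · rintro ((h | h) | ⟨d, hd, h⟩)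
        · exact .inl h
        · exact .inr ⟨c, by simp, h⟩
        · exact .inr ⟨d, by simp [hd], h⟩
      · rintro (h | ⟨d, hd, h⟩)
        · exact .inl (.inl h)
        · rcases List.mem_cons.1 hd with rfl | hd
          · exact .inl (.inr h)
          · exact .inr ⟨d, hd, h⟩

theorem nodup_foldl_union (f : Int → PySem.Set Int) (cs : List Int) (init : PySem.Set Int)
    (h : init.Nodup) :
    (cs.foldl (fun a c => PySem.Set.union a (f c)) init).Nodup := by
  induction cs generalizing init with
  | nil => exact h
  | cons c cs ih => exact ih _ (PySem.Set.nodup_union _ _ h)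

def keysLeft (adj : List (Int × List Int)) (visited : List Int) : Nat :=
  ((keysD adj).filter (fun k => decide (k ∉ visited))).length

theorem keysLeft_lt {adj : List (Int × List Int)} {visited : List Int} {node : Int}
    (h1 : node ∈ adj.map (fun p => p.1)) (h2 : node ∉ visited) :
    keysLeft adj (PySem.Set.add visited node) < keysLeft adj visited := by
  have hmem : node ∈ keysD adj := (PySem.List.mem_dedup _ _).2 h1
  have hsub : ((keysD adj).filter (fun k => decide (k ∉ PySem.Set.add visited node))).Sublist
      ((keysD adj).filter (fun k => decide (k ∉ visited))) := by
    apply List.monotone_filter_right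
    intro a ha
    simp only [decide_eq_true_eq] at *
    intro hv
    exact ha (by simp [PySem.Set.mem_add, hv])
  refine Nat.lt_of_le_of_ne hsub.length_le ?_
  intro hlen
  have heq := hsub.eq_of_length hlen
  have hin : node ∈ (keysD adj).filter (fun k => decide (k ∉ visited)) := by
    simp [List.mem_filter, hmem, h2]
  rw [← heq] at hin
  simp [List.mem_filter, PySem.Set.mem_add] at hin

theorem leavesA_char (adj : List (Int × List Int)) (nl : Int) :
    ∀ (fuel : Nat) (node : Int) (visited : PySem.Set Int),
      keysLeft adj visited < fuel →
      ∀ l, (l ∈ leavesUnderA adj nl fuel node visited ↔ Avoids adj nl (· ∈ visited) node l) := by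
  intro fuel
  induction fuel with
  | zero => intro node visited h; omega
  | succ fuel ih =>
      intro node visited hfuel l
      by_cases hv : node ∈ visited
      · simp only [leavesUnderA, if_pos hv]
        constructor
        · intro h; exact absurd h (by simp [PySem.Set.empty])
        · intro h; exact absurd hv (avoids_not h)
      · by_cases hnl : node < nl
        · simp only [leavesUnderA, if_neg hv, if_pos hnl]
          constructor
          · intro h
            have : l = node := by
              simpa [PySem.Set.empty, PySem.Set.mem_add] using h
            subst this
            exact .leaf hv hnl
          · intro h
            cases h with
            | leaf _ _ => simp [PySem.Set.empty]
            | step _ h2 _ _ => exact absurd hnl h2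
        · simp only [leavesUnderA, if_neg hv, if_neg hnl]
          by_cases hk : node ∈ adj.map (fun p => p.1)
          · have hrec : keysLeft adj (PySem.Set.add visited node) < fuel := by
              have := keysLeft_lt (visited := visited) hk hv
              omega
            rw [mem_foldl_union]
            constructor
            · rintro (h | ⟨c, hc, h⟩)
              · exact absurd h (by simp [PySem.Set.empty])
              · have := (ih c (PySem.Set.add visited node) hrec l).1 h
                exact .step hv hnl hc
                  (avoids_congr (fun z => by simp [PySem.Set.mem_add]) this)
            · intro h
              cases h with
              | leaf _ h2 => exact absurd h2 hnl
              | step _ _ h3 h4 =>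
                  refine .inr ⟨_, h3, ?_⟩
                  exact (ih _ (PySem.Set.add visited node) hrec l).2
                    (avoids_congr (fun z => by simp [PySem.Set.mem_add]) h4)
          · rw [adjGet_eq_nil_of_not_mem adj node hk]
            simp only [List.foldl_nil]
            constructor
            · intro h; exact absurd h (by simp [PySem.Set.empty])
            · intro h
              cases h with
              | leaf _ h2 => exact absurd h2 hnl
              | step _ _ h3 _ =>
                  rw [adjGet_eq_nil_of_not_mem adj node hk] at h3
                  exact absurd h3 (List.not_mem_nil)

theorem nodup_leavesA (adj : List (Int × List Int)) (nl : Int) :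
    ∀ (fuel : Nat) (node : Int) (visited : PySem.Set Int),
      (leavesUnderA adj nl fuel node visited).Nodup := by
  intro fuel
  induction fuel with
  | zero => intro node visited; simp [leavesUnderA, PySem.Set.empty]
  | succ fuel ih =>
      intro node visited
      simp only [leavesUnderA]
      split
      · simp [PySem.Set.empty]
      · split
        · exact PySem.Set.nodup_add _ _ (by simp [PySem.Set.empty])
        · exact nodup_foldl_union _ _ _ (by simp [PySem.Set.empty])

theorem avoids_reaches {adj : List (Int × List Int)} {nl : Int} {V : Int → Prop} {x l : Int}
    (h : Avoids adj nl V x l) : Reaches adj nl x l ∧ l < nl := by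
  induction h with
  | leaf _ h2 => exact ⟨.refl _, h2⟩
  | step _ h2 h3 _ ih => exact ⟨.step h2 h3 ih.1, ih.2⟩

theorem walk_suffix {adj : List (Int × List Int)} {nl : Int} {p : List Int} {l : Int}
    (h : Walk adj nl p l) : ∀ q, q <:+ p → q ≠ [] → Walk adj nl q l := by
  induction h with
  | single hl =>
      intro q hq hne
      rcases List.suffix_cons_iff.1 hq with rfl | hq
      · exact .single hl
      · simp only [List.suffix_nil] at hq; exact absurd hq hne
  | cons h1 h2 h3 ih =>
      intro q hq hne
      rcases List.suffix_cons_iff.1 hq with rfl | hq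
      · exact .cons h1 h2 h3
      · exact ih q hq hne

theorem reaches_walk {adj : List (Int × List Int)} {nl : Int} {x l : Int}
    (h : Reaches adj nl x l) : l < nl →
    ∃ p, Walk adj nl p l ∧ p.head? = some x := by
  induction h with
  | refl a => exact fun hl => ⟨[a], .single hl, rfl⟩
  | step h1 h2 _ ih =>
      intro hl
      obtain ⟨p, hw, hh⟩ := ih hl
      cases p with
      | nil => simp at hh
      | cons c' p' =>
          simp only [List.head?_cons, Option.some.injEq] at hh
          subst hh
          exact ⟨_, .cons h1 h2 hw, rfl⟩

theorem walk_avoids {adj : List (Int × List Int)} {nl : Int} :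
    ∀ (n : Nat) (p : List Int) (l : Int) (V : Int → Prop) (s : Int),
      p.length ≤ n → Walk adj nl p l → (∀ x ∈ p, ¬ V x) → p.head? = some s →
      Avoids adj nl V s l := by
  intro n
  induction n with
  | zero =>
      intro p l V s hn hw
      cases hw <;> simp at hn
  | succ n ih =>
      intro p l V s hn hw havoid hh
      cases hw with
      | single hl =>
          simp only [List.head?_cons, Option.some.injEq] at hh
          subst hh
          exact .leaf (havoid _ (by simp)) hl
      | @cons x y p' _ h1 h2 h3 =>
          simp only [List.head?_cons, Option.some.injEq] at hh
          subst hh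
          by_cases hx : x ∈ (y :: p')
          · obtain ⟨s1, t1, he⟩ := List.append_of_mem hx
            have hsuf : (x :: t1) <:+ (x :: y :: p') := by
              refine List.IsSuffix.trans ?_ (List.suffix_cons _ _)
              rw [he]; exact ⟨s1, rfl⟩
            have hw2 : Walk adj nl (x :: t1) l :=
              walk_suffix (.cons h1 h2 h3) _ hsuf (by simp)
            have hlen : (x :: t1).length ≤ n := by
              have : (y :: p').length = s1.length + t1.length + 1 := by
                rw [he]; simp; omega
              simp only [List.length_cons] at hn this ⊢
              omega
            refine ih _ _ V x hlen hw2 ?_ rfl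
            intro z hz
            apply havoid
            rcases List.mem_cons.1 hz with rfl | hz
            · simp
            · have : z ∈ y :: p' := by rw [he]; simp [hz]
              simp [this]
          · refine .step (havoid _ (by simp)) h1 h2 ?_
            refine ih _ _ _ y (by simpa using hn) h3 ?_ rfl
            intro z hz
            rintro (hvz | rfl)
            · exact havoid _ (by simp [hz]) hvz
            · exact hx hz

theorem leavesA_top (adj : List (Int × List Int)) (nl : Int) (ch l : Int) :
    l ∈ leavesUnderA adj nl ((keysD adj).length + 1) ch PySem.Set.empty ↔
      Reaches adj nl ch l ∧ l < nl := by
  have hfuel : keysLeft adj PySem.Set.empty < (keysD adj).length + 1 := by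
    have := List.length_filter_le (fun k => decide (k ∉ (PySem.Set.empty : PySem.Set Int))) (keysD adj)
    simp only [keysLeft]
    omega
  rw [leavesA_char adj nl _ ch PySem.Set.empty hfuel l]
  constructor
  · intro h; exact avoids_reaches h
  · rintro ⟨hr, hl⟩
    obtain ⟨p, hw, hh⟩ := reaches_walk hr hl
    exact walk_avoids p.length p l _ ch le_rfl hw
      (by intro x _; simp [PySem.Set.empty]) hh

-- ── B side ──

def phiB (adj : List (Int × List Int)) (stack : List Int) (seen : List Int) : Nat :=
  stack.length +
    (((keysD adj).filter (fun k => decide (k ∉ seen))).map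
      (fun k => 1 + (adjGet adj k).length)).sum

theorem phi_init (adj : List (Int × List Int)) (start : Int) :
    phiB adj [start] PySem.Set.empty = dfsFuelB adj := by
  simp [phiB, dfsFuelB, PySem.Set.empty, Nat.add_comm]

theorem sum_filter_mono (adj : List (Int × List Int)) {seen seen' : List Int}
    (h : ∀ z, z ∈ seen → z ∈ seen') :
    (((keysD adj).filter (fun k => decide (k ∉ seen'))).map
      (fun k => 1 + (adjGet adj k).length)).sum ≤
    (((keysD adj).filter (fun k => decide (k ∉ seen))).map
      (fun k => 1 + (adjGet adj k).length)).sum := by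
  have hsub : ((keysD adj).filter (fun k => decide (k ∉ seen'))).Sublist
      ((keysD adj).filter (fun k => decide (k ∉ seen))) := by
    apply List.monotone_filter_right
    intro a
    simp only [decide_eq_true_eq]
    intro ha hv
    exact ha (h _ hv)
  exact (hsub.map _).sum_le_sum (by intro a _; omega)

theorem sum_filter_drop (f : Int → Nat) (seen : List Int) (node : Int) (hns : node ∉ seen) :
    ∀ dk : List Int, dk.Nodup → node ∈ dk →
    ((dk.filter (fun k => decide (k ∉ PySem.Set.add seen node))).map f).sum + f node =
    ((dk.filter (fun k => decide (k ∉ seen))).map f).sum := by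
  intro dk
  induction dk with
  | nil => intro _ hm; simp at hm
  | cons k dk ih =>
      intro hnd hm
      have hknotin : k ∉ dk := (List.nodup_cons.1 hnd).1
      have hndk : dk.Nodup := (List.nodup_cons.1 hnd).2
      rw [List.filter_cons, List.filter_cons]
      rcases List.mem_cons.1 hm with rfl | hmk
      · have hfilters : dk.filter (fun z => decide (z ∉ PySem.Set.add seen node)) =
            dk.filter (fun z => decide (z ∉ seen)) := by
          apply List.filter_congr
          intro z hz
          have hzk : z ≠ node := fun h => hknotin (h ▸ hz)
          simp [PySem.Set.mem_add, hzk]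
        have c1 : (decide (node ∉ PySem.Set.add seen node)) = false := by
          simp [PySem.Set.mem_add]
        have c2 : (decide (node ∉ seen)) = true := by simp [hns]
        rw [c1, c2, hfilters]
        simp only [Bool.false_eq_true, if_false, if_true, List.map_cons, List.sum_cons]
        omega
      · have hk2 : k ≠ node := fun h => hknotin (h ▸ hmk)
        have h1 : (decide (k ∉ PySem.Set.add seen node)) = (decide (k ∉ seen)) := by
          simp [PySem.Set.mem_add, hk2]
        rw [h1]
        split
        · simp only [List.map_cons, List.sum_cons]
          have := ih hndk hmk
          omega
        · exact ih hndk hmk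

theorem reaches_closed {adj : List (Int × List Int)} {nl : Int} {S : List Int}
    (hclo : ∀ x ∈ S, ¬ x < nl → ∀ c ∈ adjGet adj x, c ∈ S) :
    ∀ {x z : Int}, Reaches adj nl x z → x ∈ S → z ∈ S := by
  intro x z h
  induction h with
  | refl x => exact id
  | step h1 h2 _ ih => intro hx; exact ih (hclo _ hx h1 _ h2)

theorem dfsB_main (adj : List (Int × List Int)) (nl : Int) :
    ∀ (fuel : Nat) (stack : List Int) (seen leaves : PySem.Set Int),
      phiB adj stack seen ≤ fuel →
      seen.Nodup → leaves.Nodup →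
      (∀ x ∈ seen, ¬ x < nl → ∀ c ∈ adjGet adj x, c ∈ seen ∨ c ∈ stack) →
      (∀ z, z ∈ leaves ↔ z ∈ seen ∧ z < nl) →
      ((∀ z ∈ seen, z ∈ (dfsB adj nl fuel stack seen leaves).1) ∧
       (∀ s ∈ stack, s ∈ (dfsB adj nl fuel stack seen leaves).1) ∧
       (dfsB adj nl fuel stack seen leaves).1.Nodup ∧
       (dfsB adj nl fuel stack seen leaves).2.Nodup ∧
       (∀ x ∈ (dfsB adj nl fuel stack seen leaves).1, ¬ x < nl →
          ∀ c ∈ adjGet adj x, c ∈ (dfsB adj nl fuel stack seen leaves).1) ∧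
       (∀ z, z ∈ (dfsB adj nl fuel stack seen leaves).2 ↔
          z ∈ (dfsB adj nl fuel stack seen leaves).1 ∧ z < nl) ∧
       (∀ z ∈ (dfsB adj nl fuel stack seen leaves).1,
          z ∈ seen ∨ ∃ s ∈ stack, Reaches adj nl s z)) := by
  intro fuel
  induction fuel with
  | zero =>
      intro stack seen leaves hphi hnds hndl hclo hinv
      have hstack : stack = [] := by
        have : stack.length = 0 := by
          have : stack.length ≤ phiB adj stack seen := Nat.le_add_right _ _
          omega
        exact List.length_eq_zero_iff.1 this
      subst hstack
      simp only [dfsB]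
      refine ⟨fun z hz => hz, by simp, hnds, hndl, ?_, hinv, fun z hz => .inl hz⟩
      intro x hx hxnl c hc
      rcases hclo x hx hxnl c hc with h | h
      · exact h
      · simp at h
  | succ fuel ih =>
      intro stack seen leaves hphi hnds hndl hclo hinv
      cases stack with
      | nil =>
          simp only [dfsB]
          refine ⟨fun z hz => hz, by simp, hnds, hndl, ?_, hinv, fun z hz => .inl hz⟩
          intro x hx hxnl c hc
          rcases hclo x hx hxnl c hc with h | h
          · exact h
          · simp at h
      | cons node rest =>
          by_cases hseen : node ∈ seen
          · simp only [dfsB, if_pos hseen]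
            have hphi2 : phiB adj rest seen ≤ fuel := by
              simp only [phiB, List.length_cons] at hphi ⊢
              omega
            have hclo2 : ∀ x ∈ seen, ¬ x < nl → ∀ c ∈ adjGet adj x, c ∈ seen ∨ c ∈ rest := by
              intro x hx hxnl c hc
              rcases hclo x hx hxnl c hc with h | h
              · exact .inl h
              · rcases List.mem_cons.1 h with rfl | h
                · exact .inl hseen
                · exact .inr h
            obtain ⟨i1, i2, i3, i4, i5, i6, i7⟩ := ih rest seen leaves hphi2 hnds hndl hclo2 hinv
            refine ⟨i1, ?_, i3, i4, i5, i6, ?_⟩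
            · intro s hs
              rcases List.mem_cons.1 hs with rfl | hs
              · exact i1 _ hseen
              · exact i2 _ hs
            · intro z hz
              rcases i7 z hz with h | ⟨s, hs, h⟩
              · exact .inl h
              · exact .inr ⟨s, by simp [hs], h⟩
          · have hsum2 := sum_filter_mono adj
              (seen := seen) (seen' := PySem.Set.add seen node)
              (fun z hz => by simp [PySem.Set.mem_add, hz])
            have hnds2 : (PySem.Set.add seen node).Nodup := PySem.Set.nodup_add _ _ hnds
            by_cases hnl : node < nl
            · -- leaf node
              simp only [dfsB, if_neg hseen, if_pos hnl]
              have hphi2 : phiB adj rest (PySem.Set.add seen node) ≤ fuel := by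
                simp only [phiB, List.length_cons] at hphi ⊢
                omega
              have hndl2 : (PySem.Set.add leaves node).Nodup := PySem.Set.nodup_add _ _ hndl
              have hclo2 : ∀ x ∈ PySem.Set.add seen node, ¬ x < nl →
                  ∀ c ∈ adjGet adj x, c ∈ PySem.Set.add seen node ∨ c ∈ rest := by
                intro x hx hxnl c hc
                rcases (PySem.Set.mem_add _ _ _).1 hx with hx | rfl
                · rcases hclo x hx hxnl c hc with h | h
                  · exact .inl (by simp [PySem.Set.mem_add, h])
                  · rcases List.mem_cons.1 h with rfl | h
                    · exact .inl (by simp [PySem.Set.mem_add])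
                    · exact .inr h
                · exact absurd hnl hxnl
              have hinv2 : ∀ z, z ∈ PySem.Set.add leaves node ↔
                  z ∈ PySem.Set.add seen node ∧ z < nl := by
                intro z
                simp only [PySem.Set.mem_add]
                constructor
                · rintro (hz | rfl)
                  · exact ⟨.inl ((hinv z).1 hz).1, ((hinv z).1 hz).2⟩
                  · exact ⟨.inr rfl, hnl⟩
                · rintro ⟨hz | rfl, hznl⟩
                  · exact .inl ((hinv z).2 ⟨hz, hznl⟩)
                  · exact .inr rfl
              obtain ⟨i1, i2, i3, i4, i5, i6, i7⟩ :=
                ih rest (PySem.Set.add seen node) (PySem.Set.add leaves node)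
                  hphi2 hnds2 hndl2 hclo2 hinv2
              refine ⟨?_, ?_, i3, i4, i5, i6, ?_⟩
              · intro z hz; exact i1 _ (by simp [PySem.Set.mem_add, hz])
              · intro s hs
                rcases List.mem_cons.1 hs with rfl | hs
                · exact i1 _ (by simp [PySem.Set.mem_add])
                · exact i2 _ hs
              · intro z hz
                rcases i7 z hz with h | ⟨s, hs, h⟩
                · rcases (PySem.Set.mem_add _ _ _).1 h with h | rfl
                  · exact .inl h
                  · exact .inr ⟨z, by simp, .refl _⟩
                · exact .inr ⟨s, by simp [hs], h⟩
            · -- internal node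
              simp only [dfsB, if_neg hseen, if_neg hnl]
              have hphi2 : phiB adj ((adjGet adj node).reverse ++ rest)
                  (PySem.Set.add seen node) ≤ fuel := by
                by_cases hk : node ∈ adj.map (fun p => p.1)
                · have hmem : node ∈ keysD adj := (PySem.List.mem_dedup _ _).2 hk
                  have hdrop := sum_filter_drop (fun k => 1 + (adjGet adj k).length)
                    seen node hseen (keysD adj) (PySem.List.nodup_dedup _) hmem
                  have hbeta : (fun k => 1 + (adjGet adj k).length) node =
                      1 + (adjGet adj node).length := rfl
                  rw [hbeta] at hdrop
                  simp only [phiB, List.length_cons, List.length_append,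
                    List.length_reverse] at hphi ⊢
                  omega
                · have hnil : adjGet adj node = [] := adjGet_eq_nil_of_not_mem adj node hk
                  simp only [phiB, hnil, List.length_cons, List.reverse_nil,
                    List.nil_append] at hphi ⊢
                  omega
              have hclo2 : ∀ x ∈ PySem.Set.add seen node, ¬ x < nl →
                  ∀ c ∈ adjGet adj x, c ∈ PySem.Set.add seen node ∨
                    c ∈ (adjGet adj node).reverse ++ rest := by
                intro x hx hxnl c hc
                rcases (PySem.Set.mem_add _ _ _).1 hx with hx | rfl
                · rcases hclo x hx hxnl c hc with h | h
                  · exact .inl (by simp [PySem.Set.mem_add, h])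
                  · rcases List.mem_cons.1 h with rfl | h
                    · exact .inl (by simp [PySem.Set.mem_add])
                    · exact .inr (by simp [h])
                · exact .inr (by simp [hc])
              have hinv2 : ∀ z, z ∈ leaves ↔ z ∈ PySem.Set.add seen node ∧ z < nl := by
                intro z
                rw [hinv z]
                simp only [PySem.Set.mem_add]
                constructor
                · rintro ⟨hz, hznl⟩; exact ⟨.inl hz, hznl⟩
                · rintro ⟨hz | rfl, hznl⟩
                  · exact ⟨hz, hznl⟩
                  · exact absurd hznl hnl
              obtain ⟨i1, i2, i3, i4, i5, i6, i7⟩ :=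
                ih ((adjGet adj node).reverse ++ rest) (PySem.Set.add seen node) leaves
                  hphi2 hnds2 hndl hclo2 hinv2
              refine ⟨?_, ?_, i3, i4, i5, i6, ?_⟩
              · intro z hz; exact i1 _ (by simp [PySem.Set.mem_add, hz])
              · intro s hs
                rcases List.mem_cons.1 hs with rfl | hs
                · exact i1 _ (by simp [PySem.Set.mem_add])
                · exact i2 _ (by simp [hs])
              · intro z hz
                rcases i7 z hz with h | ⟨s, hs, h⟩
                · rcases (PySem.Set.mem_add _ _ _).1 h with h | rfl
                  · exact .inl h
                  · exact .inr ⟨z, by simp, .refl _⟩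
                · rcases List.mem_append.1 hs with hs | hs
                  · refine .inr ⟨node, by simp, .step hnl (List.mem_reverse.1 hs) h⟩
                  · exact .inr ⟨s, by simp [hs], h⟩

theorem reachB_char (adj : List (Int × List Int)) (nl : Int) (start l : Int) :
    l ∈ reachLeavesB adj nl start ↔ Reaches adj nl start l ∧ l < nl := by
  obtain ⟨i1, i2, i3, i4, i5, i6, i7⟩ :=
    dfsB_main adj nl (dfsFuelB adj) [start] PySem.Set.empty PySem.Set.empty
      (le_of_eq (phi_init adj start))
      (by simp [PySem.Set.empty]) (by simp [PySem.Set.empty])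
      (by intro x hx; simp [PySem.Set.empty] at hx)
      (by intro z; simp [PySem.Set.empty])
  constructor
  · intro h
    have h2 := (i6 l).1 h
    rcases i7 l h2.1 with hc | ⟨s, hs, hr⟩
    · simp [PySem.Set.empty] at hc
    · rcases List.mem_cons.1 hs with rfl | hs
      · exact ⟨hr, h2.2⟩
      · simp at hs
  · rintro ⟨hr, hl⟩
    have hstart : start ∈ (dfsB adj nl (dfsFuelB adj) [start]
        PySem.Set.empty PySem.Set.empty).1 := i2 _ (by simp)
    have hlmem := reaches_closed i5 hr hstart
    exact (i6 l).2 ⟨hlmem, hl⟩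

theorem reachB_nodup (adj : List (Int × List Int)) (nl : Int) (start : Int) :
    (reachLeavesB adj nl start).Nodup := by
  obtain ⟨_, _, _, i4, _⟩ :=
    dfsB_main adj nl (dfsFuelB adj) [start] PySem.Set.empty PySem.Set.empty
      (le_of_eq (phi_init adj start))
      (by simp [PySem.Set.empty]) (by simp [PySem.Set.empty])
      (by intro x hx; simp [PySem.Set.empty] at hx)
      (by intro z; simp [PySem.Set.empty])
  exact i4

-- ── the two per-child leaf sets agree ──

theorem subset_perm (adj : List (Int × List Int)) (nl : Int) (ch : Int) :
    (leavesUnderA adj nl ((keysD adj).length + 1) ch PySem.Set.empty).Perm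
      (reachLeavesB adj nl ch) := by
  refine (List.perm_ext_iff_of_nodup (nodup_leavesA adj nl _ ch _)
    (reachB_nodup adj nl ch)).2 ?_
  intro a
  rw [leavesA_top, reachB_char]

theorem subset_len (adj : List (Int × List Int)) (nl : Int) (ch : Int) :
    (leavesUnderA adj nl ((keysD adj).length + 1) ch PySem.Set.empty).length =
      (reachLeavesB adj nl ch).length :=
  (subset_perm adj nl ch).length_eq

theorem subset_canon (adj : List (Int × List Int)) (nl : Int) (ch : Int) :
    canonSplit nl (leavesUnderA adj nl ((keysD adj).length + 1) ch PySem.Set.empty) =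
      canonSplit nl (reachLeavesB adj nl ch) := by
  unfold canonSplit
  rw [subset_len adj nl ch]
  split
  · exact PySem.List.sorted_eq_sorted_of_perm _ _ _ (fun a b h => h)
      (subset_perm adj nl ch)
  · apply List.filter_congr
    intro i _
    have := (subset_perm adj nl ch).mem_iff (a := i)
    simp only [decide_eq_decide]
    exact not_congr this

theorem inner_step_eq (adj : List (Int × List Int)) (n_leaves : Int) :
    ∀ (splits : List (List Int)) (ch : Int),
      (let subset := leavesUnderA adj n_leaves ((keysD adj).length + 1) ch PySem.Set.empty
       if 0 < subset.length ∧ (subset.length : Int) < n_leaves then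
         PySem.Set.add splits (canonSplit n_leaves subset)
       else splits) =
      (let subset := reachLeavesB adj n_leaves ch
       if 0 < subset.length ∧ (subset.length : Int) < n_leaves then
         PySem.Set.add splits (canonSplit n_leaves subset)
       else splits) := by
  intro splits ch
  simp only []
  rw [subset_len adj n_leaves ch, subset_canon adj n_leaves ch]

-- ===== VERDICT (by name: the statement is the Claim_ definition above) =====
theorem collect_splits_py_spec : Claim_equal_collect_splits_py := by
  intro adj n_leaves _
  unfold Spec_collect_splits_py collect_splits_py collect_splits_py_alt
  have h := inner_step_eq adj n_leaves
  congr 1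
  funext splits pc
  congr 1
  funext s c
  exact h s c
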